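-- pv_equiv track=rewrite | github.com/pypi-data/pypi-mirror-401 | packages/photonforge/photonforge-1.3.0-cp313-cp313-win_amd64.whl/photonforge/_backend/parametric_schema.py | indented_after
-- ===== SOURCE A (Python) =====
-- def indented_after(s, n):
--     for c in s:
--         if c.isspace():
--             n -= 1
--             if n < 0:
--                 return True
--         else:
--             return False
--     return False
-- ===== SOURCE B (Python) =====
-- def indented_after(s, n):
--     lead = len(s) - len(s.lstrip())
--     return lead > max(n, 0)
-- ===== Notes on version B (the rewrite author's own statement) =====
-- stated objective: simpler
-- what changed: Replaces the early-terminating per-character decrement loop with a closed form: leading-whitespace length via len(s)-len(s.lstrip()) compared against max(n,0).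
import Mathlib
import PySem

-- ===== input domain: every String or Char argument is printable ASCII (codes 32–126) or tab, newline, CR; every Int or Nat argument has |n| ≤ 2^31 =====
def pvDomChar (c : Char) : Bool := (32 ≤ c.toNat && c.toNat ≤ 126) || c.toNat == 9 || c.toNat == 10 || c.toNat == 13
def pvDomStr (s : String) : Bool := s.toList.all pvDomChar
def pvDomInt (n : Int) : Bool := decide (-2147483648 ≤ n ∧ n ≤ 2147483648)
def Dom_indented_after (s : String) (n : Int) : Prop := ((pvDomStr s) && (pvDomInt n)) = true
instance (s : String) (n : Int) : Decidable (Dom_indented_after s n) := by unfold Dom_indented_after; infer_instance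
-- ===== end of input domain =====

-- B replaces A's early-terminating per-character decrement loop with a closed form:
-- the leading-whitespace length (len(s) - len(s.lstrip())) compared against max(n, 0). Objective: simpler.


-- ===== PORT A =====
-- the for-loop over s with the mutable counter n, early returns kept in order
def indentedAfterLoop : List Char → Int → Bool
  | [], _ => false
  | c :: cs, n =>
    if PySem.Chars.isspace c then
      if n - 1 < 0 then true else indentedAfterLoop cs (n - 1)
    else false

def indented_after (s : String) (n : Int) : Bool := indentedAfterLoop s.toList n

-- ===== PORT B =====
def indented_after_alt (s : String) (n : Int) : Bool :=
  let lead : Int := (PySem.Str.len s : Int) - (PySem.Str.len (PySem.Str.lstrip s) : Int)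
  decide (lead > max n 0)

-- ===== PRECONDITION & SPEC =====
def Spec_indented_after (s : String) (n : Int) (out : Bool) : Prop := out = indented_after_alt s n
instance (s : String) (n : Int) (out : Bool) : Decidable (Spec_indented_after s n out) := by unfold Spec_indented_after; infer_instance

-- ===== CLAIM (what is proved, stated in full; the proofs are below) =====
def Claim_equal_indented_after : Prop := ∀ (s : String) (n : Int), Dom_indented_after s n → Spec_indented_after s n (indented_after s n)

-- ===== LEMMAS AND PROOFS =====

theorem indentedAfterLoop_eq (cs : List Char) : ∀ n : Int,
    indentedAfterLoop cs n
      = decide ((cs.length : Int) - ((cs.dropWhile PySem.Chars.isspace).length : Int) > max n 0) := by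
  induction cs with
  | nil => intro n; simp [indentedAfterLoop]
  | cons c cs ih =>
    intro n
    by_cases hc : PySem.Chars.isspace c
    · have hdw : (c :: cs).dropWhile PySem.Chars.isspace = cs.dropWhile PySem.Chars.isspace := by
        simp [List.dropWhile, hc]
      have hle : ((cs.dropWhile PySem.Chars.isspace).length : Int) ≤ (cs.length : Int) := by
        exact_mod_cast (List.length_dropWhile_le _ _)
      by_cases hn : n - 1 < 0
      · simp only [indentedAfterLoop, hc, if_pos hn, if_true, hdw]
        rw [eq_comm, decide_eq_true_iff]
        simp only [List.length_cons]
        push_cast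
        omega
      · simp only [indentedAfterLoop, hc, if_neg hn, if_true, hdw, ih (n - 1)]
        congr 1
        simp only [List.length_cons, eq_iff_iff]
        push_cast
        omega
    · have hdw : (c :: cs).dropWhile PySem.Chars.isspace = c :: cs := by
        simp [List.dropWhile, hc]
      rw [show indentedAfterLoop (c :: cs) n = false from by simp [indentedAfterLoop, hc], hdw,
        eq_comm, decide_eq_false_iff_not]
      omega

-- ===== VERDICT (by name: the statement is the Claim_ definition above) =====
theorem indented_after_spec : Claim_equal_indented_after := by
  intro s n _
  show indented_after s n = indented_after_alt s n
  unfold indented_after indented_after_alt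
  rw [indentedAfterLoop_eq]
  simp [PySem.Str.len, PySem.Str.lstrip, PySem.Chars.lstrip]
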